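-- pv_equiv track=rewrite | github.com/CourseReps/ECEN662-Spring2018 | Students/Guanda12Li/FinalProject/FinalProject.py | selected
-- ===== SOURCE A (Python) =====
-- def transform(sample_col):
--     row = len(sample_col)
--     col = len(sample_col[0])
--     return [[sample_col[i][j] for i in range(row)] for j in range(col)]
--
-- def selected(sample, predictors, headers):
--     sample = transform(sample)
--     Head = []
--     index = []
--     for i in sample:
--         for j in range(len(predictors)):
--             if i == predictors[j]:
--                 Head.append(headers[j])
--                 index.append(j)
--     return Head, index
-- ===== SOURCE B (Python) =====
-- def selected(sample, predictors, headers):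
--     # Inverted join: outer loop over predictors, positions indexed once,
--     # matches redistributed into per-column buckets, then flattened.
--     cols = list(zip(*sample))
--     pos_by_col = {}
--     for pos, c in enumerate(cols):
--         pos_by_col.setdefault(c, []).append(pos)
--     buckets = [[] for _ in cols]
--     for j, p in enumerate(predictors):
--         for pos in pos_by_col.get(tuple(p), ()):
--             buckets[pos].append(j)
--     Head = [headers[j] for b in buckets for j in b]
--     index = [j for b in buckets for j in b]
--     return Head, index
-- ===== Notes on version B (the rewrite author's own statement) =====
-- stated objective: faster
-- what changed: B inverts the join: it iterates over predictors (not columns), looks each predictor up in a position index built once over the columns, scatters the matched predictor indices into per-column buckets, and flattens the buckets at the end - no per-column scan over predictors and no transposed-then-matched emission loop.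
import Mathlib
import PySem

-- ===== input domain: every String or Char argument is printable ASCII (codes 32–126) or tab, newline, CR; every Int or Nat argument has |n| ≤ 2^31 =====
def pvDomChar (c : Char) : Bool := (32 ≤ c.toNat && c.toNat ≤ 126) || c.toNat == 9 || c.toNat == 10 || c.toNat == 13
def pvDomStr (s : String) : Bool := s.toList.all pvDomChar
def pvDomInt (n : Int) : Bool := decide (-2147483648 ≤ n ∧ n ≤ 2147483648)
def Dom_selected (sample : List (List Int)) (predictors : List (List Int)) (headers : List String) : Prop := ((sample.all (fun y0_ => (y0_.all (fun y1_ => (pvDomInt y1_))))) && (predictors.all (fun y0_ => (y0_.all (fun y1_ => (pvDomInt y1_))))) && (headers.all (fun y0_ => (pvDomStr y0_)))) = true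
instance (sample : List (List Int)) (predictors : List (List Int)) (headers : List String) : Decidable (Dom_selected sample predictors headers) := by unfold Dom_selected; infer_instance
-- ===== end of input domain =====

-- B inverts the join: it loops over predictors (not columns), looks each predictor up in a
-- position index built once over the columns, scatters matched predictor indices into
-- per-column buckets and flattens them (asymptotically faster than A's per-column scan).

-- ===== PORT A =====
def transformA (s : List (List Int)) : List (List Int) :=
  let row : Int := s.length
  let col : Int := (PySem.List.pyGetD s 0 []).length
  (PySem.List.pyRange 0 col 1).map (fun j =>
    (PySem.List.pyRange 0 row 1).map (fun i =>
      PySem.List.pyGetD (PySem.List.pyGetD s i []) j 0))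

def selected (sample : List (List Int)) (predictors : List (List Int)) (headers : List String) : List String × List Int :=
  let s := transformA sample
  s.foldl (fun acc i =>
    (PySem.List.pyRange 0 (predictors.length : Int) 1).foldl (fun acc j =>
      if i = PySem.List.pyGetD predictors j [] then
        (acc.1 ++ [PySem.List.pyGetD headers j ""], acc.2 ++ [j])
      else acc) acc) ([], [])

-- ===== PORT B =====
-- zip(*sample): columns truncated to the shortest row; empty when sample is empty
def zipColsB (rows : List (List Int)) : List (List Int) :=
  if rows.isEmpty then []
  else
    let n := rows.foldl (fun m r => min m r.length) (rows.headD []).length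
    (List.range n).map (fun j => rows.map (fun r => r.getD j 0))

def selected_alt (sample : List (List Int)) (predictors : List (List Int)) (headers : List String) : List String × List Int :=
  let cols := zipColsB sample
  -- pos_by_col: column value -> ordered list of its positions
  let posByCol : PySem.Dict (List Int) (List Int) :=
    (PySem.List.enumerate cols 0).foldl
      (fun d pc => d.modify pc.2 [] (fun l => l ++ [pc.1])) PySem.Dict.empty
  let buckets0 : List (List Int) := cols.map (fun _ => ([] : List Int))
  -- buckets[pos].append(j): pos comes from enumerate(cols), so 0 ≤ pos < len(cols);
  -- List.modify with pos.toNat is exact there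
  let buckets := (PySem.List.enumerate predictors 0).foldl
    (fun B jp => (posByCol.getD jp.2 []).foldl
      (fun B pos => B.modify pos.toNat (fun b => b ++ [jp.1])) B) buckets0
  (buckets.flatMap (fun b => b.map (fun j => PySem.List.pyGetD headers j "")),
   buckets.flatMap (fun b => b))

-- ===== PRECONDITION & SPEC =====
-- Pre_ excludes exactly the inputs where A raises IndexError: an empty sample, a row shorter
-- than the first row (transform's sample_col[i][j]), and a column matching a predictor whose
-- index has no header (headers[j]).
def Pre_selected (sample : List (List Int)) (predictors : List (List Int)) (headers : List String) : Prop :=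
  sample ≠ [] ∧ (∀ r ∈ sample, (sample.headD []).length ≤ r.length) ∧
  ∀ j ∈ List.range predictors.length, headers.length ≤ j →
    ∀ k ∈ List.range (sample.headD []).length,
      sample.map (fun r => r.getD k 0) ≠ predictors.getD j []
instance (sample : List (List Int)) (predictors : List (List Int)) (headers : List String) : Decidable (Pre_selected sample predictors headers) := by unfold Pre_selected; infer_instance

def pvWitness_selected : List (List Int) × List (List Int) × List String :=
  ([[1, 2], [3, 4]], [[1, 3]], ["a"])

def Spec_selected (sample : List (List Int)) (predictors : List (List Int)) (headers : List String) (out : List String × List Int) : Prop := out = selected_alt sample predictors headers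
instance (sample : List (List Int)) (predictors : List (List Int)) (headers : List String) (out : List String × List Int) : Decidable (Spec_selected sample predictors headers out) := by unfold Spec_selected; infer_instance

-- ===== CLAIM (what is proved, stated in full; the proofs are below) =====
def Claim_equal_selected : Prop := ∀ (sample : List (List Int)) (predictors : List (List Int)) (headers : List String), Dom_selected sample predictors headers → Pre_selected sample predictors headers → Spec_selected sample predictors headers (selected sample predictors headers)

-- ===== LEMMAS AND PROOFS =====

-- A's per-column list of matching predictor indices
def jmB (preds : List (List Int)) (c : List Int) : List Int :=
  (PySem.List.pyRange 0 (preds.length : Int) 1).filter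
    (fun j => decide (c = PySem.List.pyGetD preds j []))

-- the same list through enumerate (B's view)
def matchIdxB (preds : List (List Int)) (c : List Int) : List Int :=
  ((PySem.List.enumerate preds 0).filter (fun jp => jp.2 == c)).map (·.1)

theorem dict_getD_build (xs : List (List Int)) (s : Int)
    (d : PySem.Dict (List Int) (List Int)) (c : List Int) :
    ((PySem.List.enumerate xs s).foldl
        (fun d pc => d.modify pc.2 [] (fun l => l ++ [pc.1])) d).getD c []
      = d.getD c [] ++ ((PySem.List.enumerate xs s).filter (fun pc => pc.2 == c)).map (·.1) := by
  induction xs generalizing s d with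
  | nil => simp [PySem.List.enumerate_nil]
  | cons p ps ih =>
    rw [PySem.List.enumerate_cons]
    simp only [List.foldl_cons, List.filter_cons]
    rw [ih]
    by_cases h : p = c
    · subst h
      simp [PySem.Dict.getD_modify_self]
    · have hb : ((s, p).2 == c) = false := by simpa using h
      rw [PySem.Dict.getD_modify_of_ne]
      · simp [hb]
      · simpa using (Ne.symm h)

def transC (s : List (List Int)) : List (List Int) :=
  (List.range (s.headD []).length).map (fun j => s.map (fun r => r.getD j 0))

theorem map_range_getD {a b : Type} (xs : List a) (d : a) (f : a -> b) :
    (List.range xs.length).map (fun k => f (xs.getD k d)) = xs.map f := by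
  induction xs with
  | nil => simp
  | cons x xs ih =>
    rw [List.length_cons, List.range_succ_eq_map]
    simp only [List.map_cons, List.map_map]
    have h1 : ((fun k => f ((x :: xs).getD k d)) ∘ Nat.succ) = (fun k => f (xs.getD k d)) := by
      funext k; simp
    rw [h1, ih]
    simp

theorem transformA_eq (s : List (List Int)) :
    transformA s = transC s := by
  unfold transformA transC
  dsimp only
  have hcol : (PySem.List.pyGetD s 0 []) = s.headD [] := by
    cases s <;> simp [PySem.List.pyGetD_zero]
  rw [hcol, PySem.List.pyRange_zero_nat, PySem.List.pyRange_zero_nat, List.map_map]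
  refine List.map_congr_left (fun j _ => ?_)
  dsimp only [Function.comp]
  rw [List.map_map]
  have h2 : ((fun i => PySem.List.pyGetD (PySem.List.pyGetD s i []) ((j : Nat) : Int) 0) ∘ fun (k : Nat) => (k : Int))
      = (fun k => (s.getD k []).getD j 0) := by
    funext k; simp [PySem.List.pyGetD_natCast]
  rw [h2]
  exact map_range_getD s [] (fun r => r.getD j 0)

theorem foldl_min_const (l : List (List Int)) (L : Nat)
    (h : ∀ r ∈ l, L ≤ r.length) : l.foldl (fun m r => min m r.length) L = L := by
  induction l with
  | nil => rfl
  | cons x xs ih =>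
    simp only [List.foldl_cons]
    rw [min_eq_left (h x (by simp))]
    exact ih (fun r hr => h r (by simp [hr]))

theorem zipColsB_eq (s : List (List Int)) (hne : s ≠ [])
    (hrect : ∀ r ∈ s, (s.headD []).length ≤ r.length) :
    zipColsB s = transC s := by
  unfold zipColsB transC
  dsimp only
  rw [if_neg (by simpa using hne)]
  rw [foldl_min_const _ _ hrect]

theorem foldl_pair_append_ite (l : List Int) (p : Int → Prop) [DecidablePred p]
    (f : Int → String) (acc : List String × List Int) :
    l.foldl (fun acc j => if p j then (acc.1 ++ [f j], acc.2 ++ [j]) else acc) acc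
      = (acc.1 ++ (l.filter (fun j => decide (p j))).map f,
         acc.2 ++ l.filter (fun j => decide (p j))) := by
  induction l generalizing acc with
  | nil => simp
  | cons x xs ih => by_cases h : p x <;> simp [h, ih]

theorem foldl_pair_flat (l : List (List Int)) (F : List Int → List String)
    (G : List Int → List Int) (acc : List String × List Int) :
    l.foldl (fun acc c => (acc.1 ++ F c, acc.2 ++ G c)) acc
      = (acc.1 ++ l.flatMap F, acc.2 ++ l.flatMap G) := by
  induction l generalizing acc with
  | nil => simp
  | cons x xs ih => simp [ih]

theorem matches_eq (preds : List (List Int)) (c : List Int) :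
    matchIdxB preds c = jmB preds c := by
  unfold matchIdxB jmB
  rw [PySem.List.enumerate_eq_map_pyRange (d := [])]
  rw [List.filter_map, List.map_map]
  have h1 : ((fun (jp : Int × List Int) => jp.2 == c) ∘ fun j => (j, PySem.List.pyGetD preds j []))
      = fun j => decide (c = PySem.List.pyGetD preds j []) := by
    funext j
    by_cases h : PySem.List.pyGetD preds j [] = c
    · simp [h]
    · simp [h, Ne.symm h]
  have h2 : ((fun (jp : Int × List Int) => jp.1) ∘ fun j => (j, PySem.List.pyGetD preds j []))
      = id := by funext j; rfl
  rw [h1, h2, List.map_id]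
  simp [PySem.List.len_eq]

-- the flattened form of A
theorem selectedA_flat (sample : List (List Int)) (preds : List (List Int)) (headers : List String) :
    selected sample preds headers
      = ((transC sample).flatMap (fun c => (jmB preds c).map (fun j => PySem.List.pyGetD headers j "")),
         (transC sample).flatMap (jmB preds)) := by
  unfold selected
  dsimp only
  rw [transformA_eq]
  have hstep : (fun (acc : List String × List Int) i =>
      (PySem.List.pyRange 0 (preds.length : Int) 1).foldl (fun acc j =>
        if i = PySem.List.pyGetD preds j [] then
          (acc.1 ++ [PySem.List.pyGetD headers j ""], acc.2 ++ [j])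
        else acc) acc)
      = (fun (acc : List String × List Int) c =>
          (acc.1 ++ (jmB preds c).map (fun j => PySem.List.pyGetD headers j ""), acc.2 ++ jmB preds c)) := by
    funext acc c
    rw [foldl_pair_append_ite]
    rfl
  rw [hstep, foldl_pair_flat]
  simp

-- members of the position lists are nonnegative
theorem pos_nonneg (cols : List (List Int)) (c : List Int) (x : Int)
    (hx : x ∈ matchIdxB cols c) : 0 ≤ x := by
  unfold matchIdxB at hx
  obtain ⟨pc, hpc, rfl⟩ := List.mem_map.mp hx
  obtain ⟨hin, -⟩ := List.mem_filter.mp hpc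
  obtain ⟨k, hk, rfl⟩ := (PySem.List.mem_enumerate_iff _ _ _).mp hin
  simp

-- count of a position p in positions(c)
theorem pos_count (cols : List (List Int)) (c : List Int) (p : Nat) (hp : p < cols.length) :
    (matchIdxB cols c).count ((p : Nat) : Int) = if cols[p] = c then 1 else 0 := by
  have hnd : (matchIdxB cols c).Nodup := by
    unfold matchIdxB
    have h1 : ((PySem.List.enumerate cols 0).filter (fun pc => pc.2 == c)).Pairwise
        (fun a b => a.1 < b.1) := (PySem.List.pairwise_lt_enumerate cols 0).filter _
    have h2 : (((PySem.List.enumerate cols 0).filter (fun pc => pc.2 == c)).map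
        (fun pc : Int × List Int => pc.1)).Pairwise (fun a b : Int => a < b) :=
      List.Pairwise.map _ (fun a b h => h) h1
    exact h2.imp (fun h => ne_of_lt h)
  have hmem : ((p : Int) ∈ matchIdxB cols c) ↔ cols[p] = c := by
    unfold matchIdxB
    constructor
    · intro h
      obtain ⟨pc, hpc, hfst⟩ := List.mem_map.mp h
      obtain ⟨hin, hsnd⟩ := List.mem_filter.mp hpc
      obtain ⟨k, hk, rfl⟩ := (PySem.List.mem_enumerate_iff _ _ _).mp hin
      simp only [zero_add] at hfst hsnd
      have : k = p := by exact_mod_cast hfst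
      subst this
      simpa using hsnd
    · intro h
      refine List.mem_map.mpr ⟨((p : Int), cols[p]), List.mem_filter.mpr ⟨?_, by simpa using h⟩, rfl⟩
      exact (PySem.List.mem_enumerate_iff _ _ _).mpr ⟨p, hp, by simp⟩
  by_cases h : cols[p] = c
  · rw [if_pos h]
    exact List.count_eq_one_of_mem hnd (hmem.mpr h)
  · rw [if_neg h]
    exact List.count_eq_zero_of_not_mem (fun hm => h (hmem.mp hm))

theorem bucket_inner (L : List Int) (j : Int) (B : List (List Int)) (p : Nat)
    (hL : ∀ x ∈ L, 0 ≤ x) :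
    (L.foldl (fun B q => B.modify q.toNat (fun b => b ++ [j])) B)[p]?
      = B[p]?.map (fun b => b ++ List.replicate (L.count ((p : Nat) : Int)) j) := by
  induction L generalizing B with
  | nil => simp
  | cons q L' ih =>
    simp only [List.foldl_cons]
    rw [ih _ (fun x hx => hL x (by simp [hx]))]
    rw [List.getElem?_modify]
    by_cases hq : q = (p : Int)
    · have ht : q.toNat = p := by subst hq; simp
      have hc : (q == ((p : Nat) : Int)) = true := by simpa using hq
      cases hB : B[p]? with
      | none => simp
      | some b =>
        simp [ht, hc, List.count_cons, List.append_assoc, List.replicate_succ]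
    · have ht : q.toNat ≠ p := by
        intro hcon
        apply hq
        have := Int.toNat_of_nonneg (hL q (by simp))
        omega
      have hc : (q == ((p : Nat) : Int)) = false := by simpa using hq
      cases hB : B[p]? with
      | none => simp
      | some b => simp [ht, hc, List.count_cons]

theorem bucket_outer (ps : List (List Int)) (s : Int) (pos : List Int → List Int)
    (hpos : ∀ c, ∀ x ∈ pos c, 0 ≤ x) (B : List (List Int)) (p : Nat) :
    ((PySem.List.enumerate ps s).foldl
       (fun B jp => (pos jp.2).foldl (fun B q => B.modify q.toNat (fun b => b ++ [jp.1])) B) B)[p]?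
    = B[p]?.map (fun b => b ++ (PySem.List.enumerate ps s).flatMap
        (fun jp => List.replicate ((pos jp.2).count ((p : Nat) : Int)) jp.1)) := by
  induction ps generalizing s B with
  | nil => simp [PySem.List.enumerate_nil]
  | cons x rest ih =>
    rw [PySem.List.enumerate_cons]
    simp only [List.foldl_cons, List.flatMap_cons]
    rw [ih, bucket_inner _ _ _ _ (hpos x)]
    cases hB : B[p]? with
    | none => simp
    | some b => simp [List.append_assoc]

theorem flatMap_replicate_ite (l : List (Int × List Int)) (c : List Int) :
    l.flatMap (fun jp => List.replicate (if jp.2 = c then 1 else 0) jp.1)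
      = (l.filter (fun jp => jp.2 == c)).map (·.1) := by
  induction l with
  | nil => simp
  | cons x xs ih =>
    simp only [List.flatMap_cons, List.filter_cons]
    by_cases h : x.2 = c
    · simp [h, ih]
    · simp [h, ih]

-- buckets after the predictor loop = per-column match lists
theorem buckets_eq (cols preds : List (List Int)) :
    ((PySem.List.enumerate preds 0).foldl
      (fun B jp => (matchIdxB cols jp.2).foldl
        (fun B pos => B.modify pos.toNat (fun b => b ++ [jp.1])) B) (cols.map (fun _ => ([] : List Int))))
    = cols.map (fun c => matchIdxB preds c) := by
  apply List.ext_getElem?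
  intro p
  rw [bucket_outer _ _ _ (fun c x hx => pos_nonneg cols c x hx)]
  rw [List.getElem?_map, List.getElem?_map]
  cases hc : cols[p]? with
  | none => simp
  | some c =>
    have hp : p < cols.length := (List.getElem?_eq_some_iff.mp hc).1
    have hcp : cols[p] = c := by
      have := List.getElem?_eq_getElem hp
      rw [this] at hc
      exact Option.some.inj hc
    simp only [Option.map_some, List.nil_append]
    congr 1
    have hcount : ∀ jp : Int × List Int,
        (matchIdxB cols jp.2).count ((p : Nat) : Int) = if jp.2 = c then 1 else 0 := by
      intro jp
      rw [pos_count cols jp.2 p hp, hcp]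
      by_cases h : jp.2 = c
      · simp [h]
      · have : ¬ c = jp.2 := fun hh => h hh.symm
        simp [h, this]
    have hfun2 : (fun jp : Int × List Int =>
        List.replicate ((matchIdxB cols jp.2).count ((p : Nat) : Int)) jp.1)
        = (fun jp => List.replicate (if jp.2 = c then 1 else 0) jp.1) :=
      funext fun jp => by rw [hcount jp]
    rw [hfun2, flatMap_replicate_ite]
    rfl

-- ===== VERDICT (by name: the statement is the Claim_ definition above) =====
theorem selected_spec : Claim_equal_selected := by
  intro sample predictors headers _ hpre
  obtain ⟨hne, hrect, -⟩ := hpre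
  show selected sample predictors headers = selected_alt sample predictors headers
  rw [selectedA_flat]
  unfold selected_alt
  dsimp only
  rw [zipColsB_eq sample hne hrect]
  have hd : ∀ c, (((PySem.List.enumerate (transC sample) 0).foldl
      (fun d pc => d.modify pc.2 [] (fun l => l ++ [pc.1])) PySem.Dict.empty).getD c [])
      = matchIdxB (transC sample) c := by
    intro c
    rw [dict_getD_build]
    simp [PySem.Dict.empty, PySem.Dict.getD, PySem.Dict.get?, matchIdxB]
  have hfun : (fun (B : List (List Int)) (jp : Int × List Int) =>
      (((PySem.List.enumerate (transC sample) 0).foldl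
        (fun d pc => d.modify pc.2 [] (fun l => l ++ [pc.1])) PySem.Dict.empty).getD jp.2 []).foldl
        (fun B pos => B.modify pos.toNat (fun b => b ++ [jp.1])) B)
      = (fun B jp => (matchIdxB (transC sample) jp.2).foldl
        (fun B pos => B.modify pos.toNat (fun b => b ++ [jp.1])) B) := by
    funext B jp
    rw [hd]
  rw [hfun, buckets_eq]
  rw [List.flatMap_map, List.flatMap_map]
  have hm1 : (fun c => (matchIdxB predictors c).map (fun j => PySem.List.pyGetD headers j ""))
      = (fun c => (jmB predictors c).map (fun j => PySem.List.pyGetD headers j "")) :=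
    funext fun c => by rw [matches_eq]
  have hm2 : (fun c => matchIdxB predictors c) = jmB predictors :=
    funext fun c => matches_eq predictors c
  rw [hm1, hm2]
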